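-- pv_equiv track=rewrite | github.com/Ponmurugaiya/broadbandcare-grpo | env/reward.py | next_expected_tool
-- ===== SOURCE A (Python) =====
-- from typing import Dict, List
--
-- def next_expected_tool(solution_path: List[str], called_tools: List[str]) -> str | None:
--     """
--     Return the next required tool according to `solution_path` order.
--     Ignores extra (off-path) calls; progresses when a required step is matched in order.
--     """
--     required = [t for t in solution_path if t != "resolve_ticket"]
--     idx = 0
--     for t in called_tools:
--         if idx < len(required) and t == required[idx]:
--             idx += 1
--     if idx >= len(required):
--         return None
--     return required[idx]
-- ===== SOURCE B (Python) =====
-- def next_expected_tool(solution_path, called_tools):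
--     # A's greedy progress index equals the largest k such that required[:k]
--     # is a subsequence of called_tools (greedy matching is optimal for
--     # subsequence prefixes), and that predicate is monotone in k, so we
--     # binary-search for the largest k instead of scanning greedily.
--     required = [t for t in solution_path if t != "resolve_ticket"]
--
--     def prefix_is_subsequence(k):
--         it = iter(called_tools)
--         return all(x in it for x in required[:k])
--
--     lo, hi = 0, len(required)
--     while lo < hi:
--         mid = (lo + hi + 1) // 2
--         if prefix_is_subsequence(mid):
--             lo = mid
--         else:
--             hi = mid - 1
--     return required[lo] if lo < len(required) else None
-- ===== Notes on version B (the rewrite author's own statement) =====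
-- stated objective: alternative
-- what changed: B characterises A's greedy progress index as the largest k with required[:k] a subsequence of called_tools and finds it by binary search over prefix length with a subsequence predicate, instead of A's single greedy fold over called_tools
import Mathlib
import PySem

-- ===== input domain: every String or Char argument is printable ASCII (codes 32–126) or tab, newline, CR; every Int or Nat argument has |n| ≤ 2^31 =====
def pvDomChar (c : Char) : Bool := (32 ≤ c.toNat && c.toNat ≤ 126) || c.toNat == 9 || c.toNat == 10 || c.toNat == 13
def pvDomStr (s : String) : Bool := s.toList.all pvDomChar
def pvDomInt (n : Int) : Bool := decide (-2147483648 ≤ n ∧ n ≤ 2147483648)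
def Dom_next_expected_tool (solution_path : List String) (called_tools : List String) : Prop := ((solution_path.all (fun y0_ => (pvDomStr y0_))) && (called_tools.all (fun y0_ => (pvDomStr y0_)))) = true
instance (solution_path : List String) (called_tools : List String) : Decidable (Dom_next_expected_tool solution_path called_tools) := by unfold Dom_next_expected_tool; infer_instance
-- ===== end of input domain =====

-- B replaces A's greedy scan by a binary search for the largest k such that required[:k]
-- is a subsequence of called_tools (objective: alternative; not faster).

-- ===== PORT A =====
def next_expected_tool (solution_path : List String) (called_tools : List String) : Option String :=
  let required := solution_path.filter (fun t => t ≠ "resolve_ticket")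
  let idx := called_tools.foldl
    (fun idx t => if idx < required.length ∧ t = required.getD idx "" then idx + 1 else idx) 0
  if required.length ≤ idx then none else required[idx]?

-- ===== PORT B =====
-- Source B's `it = iter(called_tools); all(x in it for x in xs)`: each `x in it`
-- consumes the iterator through the first element equal to x (exact port).
def pvIsSubseq : List String → List String → Bool
  | [], _ => true
  | _ :: _, [] => false
  | x :: xs, y :: ys => if y = x then pvIsSubseq xs ys else pvIsSubseq (x :: xs) ys

-- Source B's `while lo < hi` binary-search loop
def pvBS (required called_tools : List String) (lo hi : Nat) : Nat :=
  if _h : lo < hi then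
    if pvIsSubseq (required.take ((lo + hi + 1) / 2)) called_tools then
      pvBS required called_tools ((lo + hi + 1) / 2) hi
    else
      pvBS required called_tools lo ((lo + hi + 1) / 2 - 1)
  else lo
termination_by hi - lo
decreasing_by all_goals omega

def next_expected_tool_alt (solution_path : List String) (called_tools : List String) : Option String :=
  let required := solution_path.filter (fun t => t ≠ "resolve_ticket")
  let lo := pvBS required called_tools 0 required.length
  if lo < required.length then required[lo]? else none

-- ===== PRECONDITION & SPEC =====
def Spec_next_expected_tool (solution_path : List String) (called_tools : List String) (out : Option String) : Prop := out = next_expected_tool_alt solution_path called_tools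
instance (solution_path : List String) (called_tools : List String) (out : Option String) : Decidable (Spec_next_expected_tool solution_path called_tools out) := by unfold Spec_next_expected_tool; infer_instance

-- ===== CLAIM (what is proved, stated in full; the proofs are below) =====
def Claim_equal_next_expected_tool : Prop := ∀ (solution_path : List String) (called_tools : List String), Dom_next_expected_tool solution_path called_tools → Spec_next_expected_tool solution_path called_tools (next_expected_tool solution_path called_tools)

-- ===== LEMMAS AND PROOFS =====

-- A's fold, abstracted over the required list and the start index
def pvAFold (req : List String) (calls : List String) (i : Nat) : Nat :=
  calls.foldl (fun idx t => if idx < req.length ∧ t = req.getD idx "" then idx + 1 else idx) i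

lemma pvAFold_step (req : List String) (c : String) (cs : List String) (i : Nat) :
    pvAFold req (c :: cs) i =
      pvAFold req cs (if i < req.length ∧ c = req.getD i "" then i + 1 else i) := rfl

lemma pvAFold_le (req calls : List String) (i : Nat) (h : i ≤ req.length) :
    pvAFold req calls i ≤ req.length := by
  induction calls generalizing i with
  | nil => exact h
  | cons c cs ih =>
    rw [pvAFold_step]
    split_ifs with hc
    · exact ih (i + 1) (by omega)
    · exact ih i h

lemma pvAFold_shift (r : String) (rs : List String) (calls : List String) (i : Nat) :
    pvAFold (r :: rs) calls (i + 1) = pvAFold rs calls i + 1 := by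
  induction calls generalizing i with
  | nil => rfl
  | cons c cs ih =>
    rw [pvAFold_step, pvAFold_step]
    have hcond : (i + 1 < (r :: rs).length ∧ c = (r :: rs).getD (i + 1) "") ↔
        (i < rs.length ∧ c = rs.getD i "") := by
      constructor
      · rintro ⟨h1, h2⟩
        exact ⟨by simpa using h1, by rwa [List.getD_cons_succ] at h2⟩
      · rintro ⟨h1, h2⟩
        exact ⟨by simpa using h1, by rwa [List.getD_cons_succ]⟩
    by_cases h : i < rs.length ∧ c = rs.getD i ""
    · rw [if_pos (hcond.mpr h), if_pos h]
      exact ih (i + 1)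
    · rw [if_neg (fun hc => h (hcond.mp hc)), if_neg h]
      exact ih i

-- the characterisation: for k ≤ |req|, req[:k] is a subsequence of calls iff k ≤ greedy index
lemma pvChar (calls req : List String) (k : Nat) (hk : k ≤ req.length) :
    pvIsSubseq (req.take k) calls = true ↔ k ≤ pvAFold req calls 0 := by
  induction calls generalizing req k with
  | nil =>
    cases req with
    | nil =>
      have : k = 0 := by simpa using hk
      subst this
      simp [pvIsSubseq, pvAFold]
    | cons r rs =>
      cases k with
      | zero => simp [pvIsSubseq, pvAFold]
      | succ j => simp [pvIsSubseq, pvAFold]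
  | cons c cs ih =>
    cases req with
    | nil =>
      have : k = 0 := by simpa using hk
      subst this
      simp [pvIsSubseq]
    | cons r rs =>
      by_cases hcr : c = r
      · subst hcr
        have hg : pvAFold (c :: rs) (c :: cs) 0 = pvAFold rs cs 0 + 1 := by
          rw [pvAFold_step, if_pos (by simp)]
          exact pvAFold_shift c rs cs 0
        cases k with
        | zero => simp [pvIsSubseq, hg]
        | succ j =>
          have hj : j ≤ rs.length := by simpa using hk
          rw [List.take_succ_cons]
          show pvIsSubseq (c :: rs.take j) (c :: cs) = true ↔ _
          rw [show pvIsSubseq (c :: rs.take j) (c :: cs) = pvIsSubseq (rs.take j) cs by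
            simp [pvIsSubseq]]
          rw [ih rs j hj, hg]
          omega
      · have hg : pvAFold (r :: rs) (c :: cs) 0 = pvAFold (r :: rs) cs 0 := by
          rw [pvAFold_step, if_neg (by simp [hcr])]
        cases k with
        | zero => simp [pvIsSubseq, hg]
        | succ j =>
          rw [List.take_succ_cons]
          show pvIsSubseq (r :: rs.take j) (c :: cs) = true ↔ _
          rw [show pvIsSubseq (r :: rs.take j) (c :: cs) = pvIsSubseq (r :: rs.take j) cs by
            simp [pvIsSubseq, hcr]]
          have := ih (r :: rs) (j + 1) hk
          rw [List.take_succ_cons] at this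
          rw [this, hg]

-- binary search finds the greedy index whenever it brackets it
lemma pvBS_eq (req calls : List String) (n : Nat) : ∀ (lo hi : Nat), hi - lo ≤ n →
    lo ≤ pvAFold req calls 0 → pvAFold req calls 0 ≤ hi → hi ≤ req.length →
    pvBS req calls lo hi = pvAFold req calls 0 := by
  induction n with
  | zero =>
    intro lo hi h0 h1 h2 h3
    rw [pvBS, dif_neg (by omega)]
    omega
  | succ n ih =>
    intro lo hi h0 h1 h2 h3
    rw [pvBS]
    split_ifs with hlt hs
    · have hg : (lo + hi + 1) / 2 ≤ pvAFold req calls 0 :=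
        (pvChar calls req _ (by omega)).mp hs
      exact ih _ _ (by omega) hg h2 h3
    · have hg : pvAFold req calls 0 < (lo + hi + 1) / 2 := by
        by_contra hgg
        exact hs ((pvChar calls req _ (by omega)).mpr (by omega))
      exact ih _ _ (by omega) h1 (by omega) (by omega)
    · omega

-- ===== VERDICT (by name: the statement is the Claim_ definition above) =====
theorem next_expected_tool_spec : Claim_equal_next_expected_tool := by
  intro sp ct _
  unfold Spec_next_expected_tool next_expected_tool next_expected_tool_alt
  have hle : ∀ req : List String, pvAFold req ct 0 ≤ req.length :=
    fun req => pvAFold_le req ct 0 (Nat.zero_le _)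
  have hbs : ∀ req : List String, pvBS req ct 0 req.length = pvAFold req ct 0 :=
    fun req => pvBS_eq req ct req.length 0 req.length (by omega) (Nat.zero_le _) (hle req) le_rfl
  set req := sp.filter (fun t => t ≠ "resolve_ticket") with hreq
  show (if req.length ≤ pvAFold req ct 0 then none else req[pvAFold req ct 0]?) =
    (if pvBS req ct 0 req.length < req.length then req[pvBS req ct 0 req.length]? else none)
  rw [hbs req]
  have := hle req
  by_cases h : req.length ≤ pvAFold req ct 0
  · rw [if_pos h, if_neg (by omega)]
  · rw [if_neg h, if_pos (by omega)]
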